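-- pv_equiv track=rewrite | github.com/kripsaar/AdventOfCode | 2019/04-12/04-12.py | twoAdjacentDigitsSame
-- ===== SOURCE A (Python) =====
-- def twoAdjacentDigitsSame(digitsList):
--     doubleSet = set()
--     failedSet = set()
--     for i in range(0, len(digitsList) - 1):
--         if (digitsList[i] == digitsList[i + 1]):
--             if (digitsList[i] in doubleSet):
--                 failedSet.add(digitsList[i])
--             doubleSet.add(digitsList[i])
--     return len(doubleSet) > len(failedSet)
-- ===== SOURCE B (Python) =====
-- def twoAdjacentDigitsSame(digitsList):
--     # Collect the digit value of every adjacent-equal pair, sort, then scan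
--     # the sorted list for a run of length exactly 1.
--     pairs = sorted(d for d, e in zip(digitsList, digitsList[1:]) if d == e)
--     if not pairs:
--         return False
--     cur = pairs[0]
--     cnt = 1
--     for x in pairs[1:]:
--         if x == cur:
--             cnt += 1
--         else:
--             if cnt == 1:
--                 return True
--             cur, cnt = x, 1
--     return cnt == 1
-- ===== Notes on version B (the rewrite author's own statement) =====
-- stated objective: alternative
-- what changed: Replaces A's single indexed pass with dual doubleSet/failedSet bookkeeping and a cardinality comparison by a staged sort-then-group algorithm: collect the value of every adjacent-equal pair via zip, sort those values, and scan the sorted list for a group of length exactly one.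
import Mathlib
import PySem

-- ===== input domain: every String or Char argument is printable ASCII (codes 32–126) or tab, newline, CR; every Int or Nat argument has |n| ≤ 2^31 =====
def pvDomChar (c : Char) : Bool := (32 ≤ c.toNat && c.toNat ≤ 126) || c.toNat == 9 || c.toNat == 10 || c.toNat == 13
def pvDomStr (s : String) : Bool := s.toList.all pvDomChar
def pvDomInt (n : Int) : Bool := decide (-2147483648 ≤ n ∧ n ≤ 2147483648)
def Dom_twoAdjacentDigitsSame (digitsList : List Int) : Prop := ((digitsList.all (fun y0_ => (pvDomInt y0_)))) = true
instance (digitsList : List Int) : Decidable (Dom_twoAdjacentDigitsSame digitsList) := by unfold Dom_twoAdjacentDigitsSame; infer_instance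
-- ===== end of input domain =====

-- B replaces A's doubleSet/failedSet bookkeeping by a sort-then-group-scan: collect the
-- values of adjacent-equal pairs, sort them, and look for a group of length exactly one
-- (objective: alternative).

-- ===== PORT A =====
def twoAdjacentDigitsSame (digitsList : List Int) : Bool :=
  let st := (PySem.List.pyRange 0 ((digitsList.length : Int) - 1) 1).foldl
    (fun (st : PySem.Set Int × PySem.Set Int) i =>
      if PySem.List.pyGetD digitsList i 0 = PySem.List.pyGetD digitsList (i + 1) 0 then
        (PySem.Set.add st.1 (PySem.List.pyGetD digitsList i 0),
         if PySem.Set.contains st.1 (PySem.List.pyGetD digitsList i 0) then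
           PySem.Set.add st.2 (PySem.List.pyGetD digitsList i 0)
         else st.2)
      else st)
    (PySem.Set.empty, PySem.Set.empty)
  decide (PySem.Set.len st.1 > PySem.Set.len st.2)

-- ===== PORT B =====
-- the for-loop of Source B over pairs[1:] with state (cur, cnt); returning true = early return
def pvRunScan (cur : Int) (cnt : Int) : List Int → Bool
  | [] => cnt == 1
  | x :: xs =>
      if x = cur then pvRunScan cur (cnt + 1) xs
      else if cnt = 1 then true
      else pvRunScan x 1 xs

def twoAdjacentDigitsSame_alt (digitsList : List Int) : Bool :=
  let pairs := PySem.List.sorted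
    ((digitsList.zip (PySem.List.slice digitsList (some 1) none)).filterMap
      (fun p => if p.1 = p.2 then some p.1 else none))
    (fun x => x) false
  match pairs with
  | [] => false
  | cur :: rest => pvRunScan cur 1 rest

-- ===== PRECONDITION & SPEC =====
def Spec_twoAdjacentDigitsSame (digitsList : List Int) (out : Bool) : Prop := out = twoAdjacentDigitsSame_alt digitsList
instance (digitsList : List Int) (out : Bool) : Decidable (Spec_twoAdjacentDigitsSame digitsList out) := by unfold Spec_twoAdjacentDigitsSame; infer_instance

-- ===== CLAIM (what is proved, stated in full; the proofs are below) =====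
def Claim_equal_twoAdjacentDigitsSame : Prop := ∀ (digitsList : List Int), Dom_twoAdjacentDigitsSame digitsList → Spec_twoAdjacentDigitsSame digitsList (twoAdjacentDigitsSame digitsList)

-- ===== LEMMAS AND PROOFS =====

-- the list of digit values at adjacent-equal positions, in loop order (A's index view)
def pvPairs (l : List Int) : List Int :=
  (PySem.List.pyRange 0 ((l.length : Int) - 1) 1).filterMap
    (fun i => if PySem.List.pyGetD l i 0 = PySem.List.pyGetD l (i + 1) 0 then
                some (PySem.List.pyGetD l i 0) else none)

-- A's loop step, per collected pair value
def pvStepA (st : PySem.Set Int × PySem.Set Int) (x : Int) : PySem.Set Int × PySem.Set Int :=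
  (PySem.Set.add st.1 x, if PySem.Set.contains st.1 x then PySem.Set.add st.2 x else st.2)

theorem pvA_fold_eq (l : List Int) (init : PySem.Set Int × PySem.Set Int) :
    (PySem.List.pyRange 0 ((l.length : Int) - 1) 1).foldl
      (fun (st : PySem.Set Int × PySem.Set Int) i =>
        if PySem.List.pyGetD l i 0 = PySem.List.pyGetD l (i + 1) 0 then
          (PySem.Set.add st.1 (PySem.List.pyGetD l i 0),
           if PySem.Set.contains st.1 (PySem.List.pyGetD l i 0) then
             PySem.Set.add st.2 (PySem.List.pyGetD l i 0)
           else st.2)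
        else st) init
    = (pvPairs l).foldl pvStepA init := by
  rw [pvPairs, List.foldl_filterMap]
  congr 1
  funext st i
  by_cases h : PySem.List.pyGetD l i 0 = PySem.List.pyGetD l (i + 1) 0 <;> simp [h, pvStepA]

-- invariant of A's fold: first component = values seen, second = values seen at least twice
theorem pvA_inv (ps : List Int) : ∀ (q : List Int) (d f : PySem.Set Int),
    d.Nodup → f.Nodup → (∀ x, x ∈ d ↔ x ∈ q) → (∀ x, x ∈ f ↔ 2 ≤ q.count x) →
    (ps.foldl pvStepA (d, f)).1.Nodup ∧ (ps.foldl pvStepA (d, f)).2.Nodup ∧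
    (∀ x, x ∈ (ps.foldl pvStepA (d, f)).1 ↔ x ∈ q ++ ps) ∧
    (∀ x, x ∈ (ps.foldl pvStepA (d, f)).2 ↔ 2 ≤ (q ++ ps).count x) := by
  induction ps with
  | nil => intro q d f hdn hfn hd hf; simpa using ⟨hdn, hfn, hd, hf⟩
  | cons x ps ih =>
    intro q d f hdn hfn hd hf
    have hstep : (x :: ps).foldl pvStepA (d, f) = ps.foldl pvStepA (pvStepA (d, f) x) := rfl
    rw [hstep]
    have hd' : ∀ y, y ∈ PySem.Set.add d x ↔ y ∈ q ++ [x] := by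
      intro y; rw [PySem.Set.mem_add]; simp [hd y]
    have hf' : ∀ y, y ∈ (pvStepA (d, f) x).2 ↔ 2 ≤ (q ++ [x]).count y := by
      intro y
      simp only [pvStepA]
      by_cases hc : PySem.Set.contains d x = true
      · have hxq : x ∈ q := by
          have hx : x ∈ d := by simpa [PySem.Set.contains] using hc
          exact (hd x).1 hx
        simp only [hc, if_pos]
        rw [PySem.Set.mem_add]
        by_cases hyx : y = x
        · subst hyx
          have h1 : 1 ≤ q.count y := List.one_le_count_iff.mpr hxq
          simp [List.count_append]
          omega
        · have h0 : List.count y [x] = 0 := by simp [Ne.symm hyx]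
          simp [List.count_append, hf y, h0, hyx]
      · have hxq : x ∉ q := by
          intro hxq
          exact hc (by simpa [PySem.Set.contains] using (hd x).2 hxq)
        simp only [hc, if_neg, Bool.false_eq_true, not_false_iff]
        by_cases hyx : y = x
        · subst hyx
          have h0 : q.count y = 0 := List.count_eq_zero.mpr hxq
          simp [hf y, List.count_append, h0]
        · have h0 : List.count y [x] = 0 := by simp [Ne.symm hyx]
          simp [List.count_append, hf y, h0]
    have hres := ih (q ++ [x]) (PySem.Set.add d x) (pvStepA (d, f) x).2
      (PySem.Set.nodup_add d x hdn)
      (by simp only [pvStepA]; split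
          · exact PySem.Set.nodup_add f x hfn
          · exact hfn)
      hd' hf'
    have hrw : pvStepA (d, f) x = (PySem.Set.add d x, (pvStepA (d, f) x).2) := rfl
    rw [hrw]
    simpa using hres

-- the heart of A: its cardinality comparison ↔ some value has exactly one adjacent pair
theorem pvMain (ps : List Int) (d f : PySem.Set Int)
    (hdn : d.Nodup) (hfn : f.Nodup)
    (hd : ∀ x, x ∈ d ↔ x ∈ ps) (hf : ∀ x, x ∈ f ↔ 2 ≤ ps.count x) :
    ((f.length : Int) < (d.length : Int)) ↔ ∃ x, ps.count x = 1 := by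
  have hsub : f.toFinset ⊆ d.toFinset := by
    intro x hx
    rw [List.mem_toFinset] at *
    exact (hd x).2 (List.one_le_count_iff.mp (by have := (hf x).1 hx; omega))
  have hcards : f.toFinset.card = f.length := List.toFinset_card_of_nodup hfn
  have hcardd : d.toFinset.card = d.length := List.toFinset_card_of_nodup hdn
  constructor
  · intro hlt
    have hclt : f.toFinset.card < d.toFinset.card := by omega
    have hss : f.toFinset ⊂ d.toFinset := Finset.ssubset_iff_subset_ne.mpr
      ⟨hsub, by intro h; rw [h] at hclt; omega⟩
    obtain ⟨x, hxd, hxf⟩ := Finset.exists_of_ssubset hss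
    rw [List.mem_toFinset] at hxd hxf
    refine ⟨x, ?_⟩
    have h1 : 1 ≤ ps.count x := List.one_le_count_iff.mpr ((hd x).1 hxd)
    have h2 : ¬ 2 ≤ ps.count x := fun h => hxf ((hf x).2 h)
    omega
  · intro ⟨x, hx⟩
    have hxd : x ∈ d.toFinset := List.mem_toFinset.mpr ((hd x).2 (List.one_le_count_iff.mp (by omega)))
    have hxf : x ∉ f.toFinset := fun h => by
      have := (hf x).1 (List.mem_toFinset.mp h); omega
    have hss : f.toFinset ⊂ d.toFinset := Finset.ssubset_iff_of_subset hsub |>.mpr ⟨x, hxd, hxf⟩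
    have hlt := Finset.card_lt_card hss
    omega

-- A's index-based pair view equals B's zip-based pair view
theorem pvZip_eq_pairs (l : List Int) :
    (l.zip (PySem.List.slice l (some 1) none)).filterMap
      (fun p => if p.1 = p.2 then some p.1 else none) = pvPairs l := by
  rw [PySem.List.slice_from_one, pvPairs]
  have hmap : (PySem.List.pyRange 0 ((l.length : Int) - 1) 1).map
      (fun i => (PySem.List.pyGetD l i 0, PySem.List.pyGetD l (i + 1) 0)) = l.zip l.tail := by
    apply List.ext_getElem
    · simp only [List.length_map, PySem.List.length_pyRange_one, List.length_zip,
        List.length_tail]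
      omega
    · intro k h1 h2
      have hk : k < l.length - 1 := by
        simp only [List.length_zip, List.length_tail] at h2
        omega
      have ht : k < l.tail.length := by
        simp only [List.length_tail]; omega
      rw [List.getElem_map, PySem.List.getElem_pyRange_one, List.getElem_zip]
      have e1 : PySem.List.pyGetD l (0 + (k : Int)) 0 = l[k]'(by omega) := by
        rw [zero_add, PySem.List.pyGetD_natCast]
        exact List.getD_eq_getElem l 0 (by omega)
      have e2 : PySem.List.pyGetD l (0 + (k : Int) + 1) 0 = l.tail[k]'ht := by
        have hcast : (0 + (k : Int) + 1) = ((k + 1 : Nat) : Int) := by push_cast; ring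
        rw [hcast, PySem.List.pyGetD_natCast, List.getElem_tail]
        exact List.getD_eq_getElem l 0 (by omega)
      rw [e1, e2]
  calc (l.zip l.tail).filterMap (fun p => if p.1 = p.2 then some p.1 else none)
      = ((PySem.List.pyRange 0 ((l.length : Int) - 1) 1).map
          (fun i => (PySem.List.pyGetD l i 0, PySem.List.pyGetD l (i + 1) 0))).filterMap
          (fun p => if p.1 = p.2 then some p.1 else none) := by rw [hmap]
    _ = _ := by rw [List.filterMap_map]; rfl

-- correctness of the run scan
-- top of Source B's scan: empty pairs list -> False, else scan with the head as cur, cnt = 1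
def pvScanTop : List Int → Bool
  | [] => false
  | cur :: rest => pvRunScan cur 1 rest

theorem pvRunScan_iff (rest : List Int) : ∀ (cur : Int) (cnt : Int), 1 ≤ cnt →
    (cur :: rest).Pairwise (· ≤ ·) →
    (pvRunScan cur cnt rest = true ↔
      (cnt = 1 ∧ rest.count cur = 0) ∨ ∃ v, v ≠ cur ∧ rest.count v = 1) := by
  induction rest with
  | nil =>
    intro cur cnt h1 _
    simp [pvRunScan]
  | cons x xs ih =>
    intro cur cnt h1 hp
    have hp' : (x :: xs).Pairwise (· ≤ ·) := hp.of_cons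
    by_cases hx : x = cur
    · subst hx
      rw [pvRunScan, if_pos rfl]
      rw [ih x (cnt + 1) (by omega) hp']
      constructor
      · rintro (⟨h, _⟩ | ⟨v, hv, hc⟩)
        · omega
        · refine Or.inr ⟨v, hv, ?_⟩
          simp [Ne.symm hv, hc]
      · rintro (⟨_, h0⟩ | ⟨v, hv, hc⟩)
        · simp at h0
        · refine Or.inr ⟨v, hv, ?_⟩
          simpa [List.count_cons, Ne.symm hv] using hc
    · have hle : cur ≤ x := (List.pairwise_cons.mp hp).1 x (by simp)
      have hlt : cur < x := lt_of_le_of_ne hle (fun h => hx h.symm)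
      have hnotin : cur ∉ x :: xs := by
        intro hmem
        rcases List.mem_cons.mp hmem with h | h
        · exact absurd h.symm hx
        · have := (List.pairwise_cons.mp hp').1 cur h
          omega
      have hnotin' : cur ∉ xs := fun h => hnotin (List.mem_cons_of_mem _ h)
      have hcnt0 : (x :: xs).count cur = 0 := List.count_eq_zero.mpr hnotin
      rw [pvRunScan, if_neg hx]
      by_cases hc1 : cnt = 1
      · rw [if_pos hc1]
        simp only [true_iff]
        exact Or.inl ⟨hc1, hcnt0⟩
      · rw [if_neg hc1]
        rw [ih x 1 le_rfl hp']
        constructor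
        · rintro (⟨_, h0⟩ | ⟨v, hv, hcv⟩)
          · refine Or.inr ⟨x, fun h => hx h, ?_⟩
            simp [h0]
          · have hvmem : v ∈ xs := List.count_pos_iff.mp (by omega)
            refine Or.inr ⟨v, fun h => hnotin' (h ▸ hvmem), ?_⟩
            simp [Ne.symm hv, hcv]
        · rintro (⟨h, _⟩ | ⟨v, hv, hcv⟩)
          · exact absurd h hc1
          · by_cases hvx : v = x
            · subst hvx
              simp at hcv
              exact Or.inl ⟨rfl, hcv⟩
            · refine Or.inr ⟨v, hvx, ?_⟩
              simpa [List.count_cons, Ne.symm hvx] using hcv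

-- entry form of the scan: some value occurs exactly once in the sorted list
theorem pvScan_entry (s : List Int) (hs : s.Pairwise (· ≤ ·)) :
    pvScanTop s = true ↔ ∃ v, s.count v = 1 := by
  cases s with
  | nil => simp [pvScanTop]
  | cons cur rest =>
    rw [pvScanTop, pvRunScan_iff rest cur 1 le_rfl hs]
    constructor
    · rintro (⟨_, h0⟩ | ⟨v, hv, hc⟩)
      · exact ⟨cur, by simp [List.count_cons, h0]⟩
      · exact ⟨v, by simp [Ne.symm hv, hc]⟩
    · rintro ⟨v, hv⟩
      by_cases hvc : v = cur
      · subst hvc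
        simp at hv
        exact Or.inl ⟨rfl, hv⟩
      · refine Or.inr ⟨v, hvc, ?_⟩
        simpa [List.count_cons, Ne.symm hvc] using hv

-- ===== VERDICT (by name: the statement is the Claim_ definition above) =====
theorem twoAdjacentDigitsSame_spec : Claim_equal_twoAdjacentDigitsSame := by
  intro l _
  unfold Spec_twoAdjacentDigitsSame
  have hform : twoAdjacentDigitsSame_alt l
      = pvScanTop (PySem.List.sorted (pvPairs l) (fun x => x) false) := by
    unfold twoAdjacentDigitsSame_alt
    rw [pvZip_eq_pairs]
    cases h : PySem.List.sorted (pvPairs l) (fun x => x) false <;> simp [pvScanTop]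
  rw [hform]
  unfold twoAdjacentDigitsSame
  rw [pvA_fold_eq]
  obtain ⟨hdn, hfn, hd, hf⟩ := pvA_inv (pvPairs l) [] PySem.Set.empty PySem.Set.empty
    (by simp [PySem.Set.empty]) (by simp [PySem.Set.empty])
    (by simp [PySem.Set.empty]) (by simp [PySem.Set.empty])
  simp only [List.nil_append] at hd hf
  have h1 := pvMain (pvPairs l) _ _ hdn hfn hd hf
  have hperm : (PySem.List.sorted (pvPairs l) (fun x => x) false).Perm (pvPairs l) :=
    PySem.List.sorted_perm _ _ _
  have hpw : (PySem.List.sorted (pvPairs l) (fun x => x) false).Pairwise (· ≤ ·) := by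
    have := PySem.List.sorted_pairwise (pvPairs l) (fun x => x)
    simpa using this
  have h2 := pvScan_entry (PySem.List.sorted (pvPairs l) (fun x => x) false) hpw
  have hcnt : ∀ v, (PySem.List.sorted (pvPairs l) (fun x => x) false).count v
      = (pvPairs l).count v := fun v => hperm.count_eq v
  simp only [hcnt] at h2
  simp only [PySem.Set.len, gt_iff_lt]
  rw [Bool.eq_iff_iff, decide_eq_true_iff]
  exact h1.trans h2.symm
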